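-- pv_equiv track=rewrite | github.com/posl/comment_recommendation | script/split_gen/4_time/zh/249_D/7.py | solve
-- ===== SOURCE A (Python) =====
-- def solve(n, arr):
--     # Write your code here
--     ans = 0
--     for i in range(n):
--         for j in range(i, n):
--             for k in range(j, n):
--                 if arr[i] * arr[j] == arr[k]:
--                     ans += 1
--     return ans
-- ===== SOURCE B (Python) =====
-- def solve(n, arr):
--     # One pass over j descending with a suffix counter of arr[j:n]:
--     # for each j, cnt holds multiplicities of arr[j..n-1], and we add,
--     # for every i <= j, how many k in [j, n) satisfy arr[i]*arr[j] == arr[k].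
--     cnt = {}
--     ans = 0
--     for j in range(n - 1, -1, -1):
--         v = arr[j]
--         cnt[v] = cnt.get(v, 0) + 1
--         for i in range(j + 1):
--             ans += cnt.get(arr[i] * v, 0)
--     return ans
-- ===== Notes on version B (the rewrite author's own statement) =====
-- stated objective: faster
-- what changed: Replaced the triple nested scan with a single descending pass over j that maintains a suffix-count dictionary of arr[j:n], so the innermost k-scan becomes one dictionary lookup per pair (i,j), dropping O(n^3) to O(n^2).
import Mathlib
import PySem

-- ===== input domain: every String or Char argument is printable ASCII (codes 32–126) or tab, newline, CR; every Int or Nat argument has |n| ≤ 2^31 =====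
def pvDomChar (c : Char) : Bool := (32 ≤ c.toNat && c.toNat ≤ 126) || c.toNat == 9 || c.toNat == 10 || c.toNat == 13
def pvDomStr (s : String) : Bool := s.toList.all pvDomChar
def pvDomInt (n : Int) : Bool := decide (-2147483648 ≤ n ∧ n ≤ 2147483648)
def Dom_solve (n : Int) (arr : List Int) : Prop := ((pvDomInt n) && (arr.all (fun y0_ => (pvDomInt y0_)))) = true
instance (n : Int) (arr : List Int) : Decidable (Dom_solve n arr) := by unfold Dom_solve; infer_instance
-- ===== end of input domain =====

-- B replaces A's triple nested scan by one descending pass maintaining a suffix-count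
-- dictionary of arr[j:n], turning the innermost scan into a dictionary lookup.

-- ===== PORT A =====
def solve (n : Int) (arr : List Int) : Int :=
  (PySem.List.pyRange 0 n).foldl (fun ans i =>
    (PySem.List.pyRange i n).foldl (fun ans j =>
      (PySem.List.pyRange j n).foldl (fun ans k =>
        if PySem.List.pyGetD arr i 0 * PySem.List.pyGetD arr j 0 = PySem.List.pyGetD arr k 0
        then ans + 1 else ans) ans) ans) 0

-- ===== PORT B =====
def solve_alt (n : Int) (arr : List Int) : Int :=
  ((PySem.List.pyRange (n - 1) (-1) (-1)).foldl
    (fun (st : PySem.Dict Int Int × Int) j =>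
      let v := PySem.List.pyGetD arr j 0
      let cnt := st.1.insert v (st.1.getD v 0 + 1)
      (cnt, (PySem.List.pyRange 0 (j + 1)).foldl
              (fun ans i => ans + cnt.getD (PySem.List.pyGetD arr i 0 * v) 0) st.2))
    (PySem.Dict.empty, 0)).2

-- ===== PRECONDITION & SPEC =====
-- Pre_: Python A indexes arr[i] for every i in range(n), so it raises IndexError iff n > len(arr).
def Pre_solve (n : Int) (arr : List Int) : Prop := n ≤ (arr.length : Int)
instance (n : Int) (arr : List Int) : Decidable (Pre_solve n arr) := by unfold Pre_solve; infer_instance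
def pvWitness_solve : Int × List Int := (3, [1, 2, 2])

def Spec_solve (n : Int) (arr : List Int) (out : Int) : Prop := out = solve_alt n arr
instance (n : Int) (arr : List Int) (out : Int) : Decidable (Spec_solve n arr out) := by unfold Spec_solve; infer_instance

-- ===== CLAIM (what is proved, stated in full; the proofs are below) =====
def Claim_equal_solve : Prop := ∀ (n : Int) (arr : List Int), Dom_solve n arr → Pre_solve n arr → Spec_solve n arr (solve n arr)

-- ===== LEMMAS AND PROOFS =====

-- arr[t] as both ports read it
def aG (arr : List Int) (t : Int) : Int := PySem.List.pyGetD arr t 0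

-- number of k in [j, n) with arr[i]*arr[j] == arr[k]
def Fc (arr : List Int) (n : Int) (i j : Int) : Int :=
  ((PySem.List.pyRange j n).countP (fun k => decide (aG arr i * aG arr j = aG arr k)) : Int)

-- B's dictionary after processing the positions in H (in order)
def dictOf (arr : List Int) (H : List Int) : PySem.Dict Int Int :=
  H.foldl (fun d j => d.insert (aG arr j) (d.getD (aG arr j) 0 + 1)) PySem.Dict.empty

-- B's inner-loop total at step j
def innerB (arr : List Int) (n : Int) (j : Int) : Int :=
  ((PySem.List.pyRange 0 (j + 1)).map (fun i => Fc arr n i j)).sum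

-- B's answer after the first m iterations (j = n-1 … n-m)
def Bsum (arr : List Int) (nn : Int) : Nat → Int
  | 0 => 0
  | m + 1 => Bsum arr nn m + innerB arr nn (m : Int)

lemma getD_dictOf (arr H : List Int) (v : Int) :
    (dictOf arr H).getD v 0 = (H.countP (fun k => decide (aG arr k = v)) : Int) := by
  unfold dictOf
  rw [← List.foldl_map (f := aG arr) (g := fun (d : PySem.Dict Int Int) x => d.insert x (d.getD x 0 + 1)),
    PySem.Dict.getD_foldl_insert_add_one]
  have h0 : (PySem.Dict.empty : PySem.Dict Int Int).getD v 0 = 0 := rfl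
  rw [h0, List.count_eq_countP, List.countP_map]
  simp only [Function.comp_def, zero_add, Nat.cast_inj]
  exact List.countP_congr (by intro x _; simp only [beq_iff_eq, decide_eq_true_eq]; try exact eq_comm)

lemma lemA (n : Int) (arr : List Int) :
    solve n arr
      = ((PySem.List.pyRange 0 n).map (fun i =>
          ((PySem.List.pyRange i n).map (fun j => Fc arr n i j)).sum)).sum := by
  unfold solve
  rw [PySem.List.foldl_congr_mem _ _
      (fun ans i => ans + ((PySem.List.pyRange i n).map (fun j => Fc arr n i j)).sum) 0 ?_]
  · rw [PySem.List.foldl_add, zero_add]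
  · intro acc i _
    rw [PySem.List.foldl_congr_mem _ _ (fun ans j => ans + Fc arr n i j) acc ?_]
    · rw [PySem.List.foldl_add]
    · intro acc2 j _
      rw [PySem.List.foldl_ite_add_one
        (p := fun k => PySem.List.pyGetD arr i 0 * PySem.List.pyGetD arr j 0 = PySem.List.pyGetD arr k 0)]
      rfl

lemma loopB (arr : List Int) (n : Int) : ∀ (m : Nat) (acc : Int), (m : Int) ≤ n →
    (PySem.List.pyRange ((m : Int) - 1) (-1) (-1)).foldl
      (fun (st : PySem.Dict Int Int × Int) j =>
        let v := PySem.List.pyGetD arr j 0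
        let cnt := st.1.insert v (st.1.getD v 0 + 1)
        (cnt, (PySem.List.pyRange 0 (j + 1)).foldl
                (fun ans i => ans + cnt.getD (PySem.List.pyGetD arr i 0 * v) 0) st.2))
      (dictOf arr (PySem.List.pyRange (m : Int) n).reverse, acc)
    = (dictOf arr (PySem.List.pyRange 0 n).reverse, acc + Bsum arr n m) := by
  intro m
  induction m with
  | zero =>
    intro acc _
    rw [show ((0 : Nat) : Int) - 1 = -1 by norm_num, PySem.List.pyRange_neg_one_eq_nil le_rfl]
    simp [Bsum]
  | succ m ih =>
    intro acc hle
    have hmn : (m : Int) < n := by push_cast at hle ⊢; omega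
    have h1 : ((m + 1 : Nat) : Int) - 1 = (m : Int) := by push_cast; ring
    rw [h1, PySem.List.pyRange_neg_one_cons (show (-1 : Int) < (m : Int) by omega), List.foldl_cons]
    have hH : (PySem.List.pyRange ((m + 1 : Nat) : Int) n).reverse ++ [(m : Int)]
        = (PySem.List.pyRange (m : Int) n).reverse := by
      rw [show ((m + 1 : Nat) : Int) = (m : Int) + 1 by push_cast; ring]
      rw [PySem.List.pyRange_one_cons hmn, List.reverse_cons]
    have hcnt : (dictOf arr (PySem.List.pyRange ((m + 1 : Nat) : Int) n).reverse).insert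
          (PySem.List.pyGetD arr (m : Int) 0)
          ((dictOf arr (PySem.List.pyRange ((m + 1 : Nat) : Int) n).reverse).getD
            (PySem.List.pyGetD arr (m : Int) 0) 0 + 1)
        = dictOf arr (PySem.List.pyRange (m : Int) n).reverse := by
      rw [← hH]; unfold dictOf; rw [List.foldl_append]; rfl
    show (PySem.List.pyRange ((m : Int) - 1) (-1) (-1)).foldl _ (_, _) = _
    rw [hcnt]
    have hinner : (PySem.List.pyRange 0 ((m : Int) + 1)).foldl
        (fun ans i => ans + (dictOf arr (PySem.List.pyRange (m : Int) n).reverse).getD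
          (PySem.List.pyGetD arr i 0 * PySem.List.pyGetD arr (m : Int) 0) 0) acc
        = acc + innerB arr n (m : Int) := by
      rw [PySem.List.foldl_congr_mem _ _ (fun ans i => ans + Fc arr n i (m : Int)) acc ?_]
      · rw [PySem.List.foldl_add]; rfl
      · intro acc2 i _
        have := getD_dictOf arr (PySem.List.pyRange (m : Int) n).reverse
          (PySem.List.pyGetD arr i 0 * PySem.List.pyGetD arr (m : Int) 0)
        rw [this, List.countP_reverse]
        unfold Fc aG
        congr 1
        exact_mod_cast List.countP_congr (by intro k _; simp [eq_comm])
    rw [hinner, ih (acc + innerB arr n (m : Int)) (le_of_lt hmn)]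
    congr 1
    rw [show Bsum arr n (m + 1) = Bsum arr n m + innerB arr n (m : Int) from rfl]
    ring

lemma lemB (n : Int) (arr : List Int) : solve_alt n arr = Bsum arr n n.toNat := by
  unfold solve_alt
  by_cases hn : n ≤ 0
  · rw [PySem.List.pyRange_neg_one_eq_nil (by omega : n - 1 ≤ -1)]
    simp [show n.toNat = 0 by omega, Bsum]
  · have hm : ((n.toNat : Nat) : Int) = n := Int.toNat_of_nonneg (by omega)
    have := loopB arr n n.toNat 0 (by omega)
    rw [hm] at this
    rw [show dictOf arr (PySem.List.pyRange n n).reverse = PySem.Dict.empty by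
        rw [PySem.List.pyRange_one_eq_nil le_rfl]; rfl] at this
    rw [this]
    exact zero_add _

-- list-range sums as Finset sums
lemma sum_map_range (f : Nat → Int) (N : Nat) :
    ((List.range N).map f).sum = ∑ i ∈ Finset.range N, f i := by
  induction N with
  | zero => simp
  | succ N ih => rw [List.range_succ, Finset.sum_range_succ, List.map_append, List.sum_append, ih]; simp

lemma pyRange_sum (a b : Int) (f : Int → Int) :
    ((PySem.List.pyRange a b).map f).sum = ∑ t ∈ Finset.range (b - a).toNat, f (a + t) := by
  rw [PySem.List.pyRange_one, List.map_map, sum_map_range]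
  rfl

lemma triangle (N : Nat) (F : Nat → Nat → Int) :
    ∑ i ∈ Finset.range N, ∑ j ∈ Finset.Ico i N, F i j
      = ∑ j ∈ Finset.range N, ∑ i ∈ Finset.range (j + 1), F i j := by
  rw [Finset.sum_comm' (t' := Finset.range N) (s' := fun j => Finset.range (j + 1))]
  intro i j
  simp only [Finset.mem_range, Finset.mem_Ico]
  omega

lemma bsum_finset (arr : List Int) (n : Int) (m : Nat) :
    Bsum arr n m = ∑ j ∈ Finset.range m, ∑ i ∈ Finset.range (j + 1),
      Fc arr n (i : Int) (j : Int) := by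
  induction m with
  | zero => simp [Bsum]
  | succ m ih =>
    rw [show Bsum arr n (m + 1) = Bsum arr n m + innerB arr n (m : Int) from rfl,
      Finset.sum_range_succ, ih]
    congr 1
    unfold innerB
    rw [pyRange_sum]
    rw [show ((m : Int) + 1 - 0).toNat = m + 1 by omega]
    exact Finset.sum_congr rfl (fun i _ => by norm_num)

lemma asum_finset (arr : List Int) (n : Int) :
    solve n arr = ∑ i ∈ Finset.range n.toNat, ∑ j ∈ Finset.Ico i n.toNat,
      Fc arr n (i : Int) (j : Int) := by
  rw [lemA, pyRange_sum]
  have h0 : (n - 0).toNat = n.toNat := by omega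
  rw [h0]
  apply Finset.sum_congr rfl
  intro i hi
  have hi' : i < n.toNat := Finset.mem_range.mp hi
  rw [show (0 : Int) + (i : Int) = (i : Int) by ring, pyRange_sum]
  have h1 : (n - (i : Int)).toNat = n.toNat - i := by omega
  rw [h1, Finset.sum_Ico_eq_sum_range]
  apply Finset.sum_congr rfl
  intro t _
  norm_num

-- ===== VERDICT (by name: the statement is the Claim_ definition above) =====
theorem solve_spec : Claim_equal_solve := by
  intro n arr _ _
  unfold Spec_solve
  rw [asum_finset, lemB, bsum_finset arr n n.toNat, triangle]
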